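-- pv_equiv track=rewrite | github.com/scv1702/2024-programmers-study | week4/2개 이하로 다른 비트/kimjhyun0627/Solution.py | solution
-- ===== SOURCE A (Python) =====
-- def solution(numbers):
--
--     answer = []
--     for n in numbers:
--         origin = n
--         cnt = 0
--         while n % 2 == 1:
--             n //= 2
--             cnt += 1
--         answer.append(origin+2**(cnt-1) if cnt else origin+1)
--
--     return answer
-- ===== SOURCE B (Python) =====
-- def solution(numbers):
--     # Even n: set the last bit -> n + 1.
--     # Odd n: the answer flips the lowest 0-bit of n (the lowest set bit of n+1)
--     # and clears the bit below it, i.e. add ((n+1) & -(n+1)) >> 1.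
--     return [n + 1 if n % 2 == 0 else n + (((n + 1) & -(n + 1)) >> 1) for n in numbers]
-- ===== Notes on version B (the rewrite author's own statement) =====
-- stated objective: idiomatic
-- what changed: The per-element while-loop that counts trailing one-bits (with a counter and 2**(cnt-1)) is replaced by a closed-form bit trick: for odd n add the lowest set bit of n+1 shifted right by one, for even n add 1; no inner loop or counter remains.
-- outside the precondition, e.g. on solution([-1]): A does not finish within the time limit, B returns [-1]
import Mathlib
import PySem

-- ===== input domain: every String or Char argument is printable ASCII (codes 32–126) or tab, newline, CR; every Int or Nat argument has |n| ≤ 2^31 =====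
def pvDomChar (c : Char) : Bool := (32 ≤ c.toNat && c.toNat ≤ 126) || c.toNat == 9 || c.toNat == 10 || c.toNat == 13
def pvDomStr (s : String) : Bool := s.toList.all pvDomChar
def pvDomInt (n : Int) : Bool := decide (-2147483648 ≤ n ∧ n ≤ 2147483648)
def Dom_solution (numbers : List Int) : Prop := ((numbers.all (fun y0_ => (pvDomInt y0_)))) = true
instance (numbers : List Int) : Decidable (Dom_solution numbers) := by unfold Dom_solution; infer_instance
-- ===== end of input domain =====

-- B replaces A's per-element trailing-ones counting loop by a closed-form bit trick per element (idiomatic; no inner loop).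


-- ===== PORT A =====
-- A's inner 'while n % 2 == 1: n //= 2; cnt += 1', ported with fuel; n.natAbs + 1 steps
-- always suffice whenever the Python loop terminates (every n ≠ -1).
def solutionLoop : Nat → Int → Nat → Int × Nat
  | 0, n, cnt => (n, cnt)
  | fuel + 1, n, cnt =>
    if PySem.Int.mod n 2 = 1 then solutionLoop fuel (PySem.Int.floordiv n 2) (cnt + 1)
    else (n, cnt)

def solution (numbers : List Int) : List Int :=
  numbers.foldl
    (fun answer n =>
      let origin := n
      let cnt := (solutionLoop (n.natAbs + 1) n 0).2
      answer ++ [if cnt ≠ 0 then origin + 2 ^ (cnt - 1) else origin + 1])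
    []

-- ===== PORT B =====
def solution_alt (numbers : List Int) : List Int :=
  numbers.map (fun n =>
    if PySem.Int.mod n 2 = 0 then n + 1
    else n + (PySem.Int.band (n + 1) (-(n + 1)) >>> (1 : Nat)))

-- ===== PRECONDITION & SPEC =====
-- Pre_ excludes lists containing -1: on -1 Python's A loops forever (-1 // 2 == -1) and never returns.
def Pre_solution (numbers : List Int) : Prop := (-1 : Int) ∉ numbers
instance (numbers : List Int) : Decidable (Pre_solution numbers) := by unfold Pre_solution; infer_instance
def pvWitness_solution : List Int := [0, 1, 2, 7, -3, 12, 2147483647]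

def Spec_solution (numbers : List Int) (out : List Int) : Prop := out = solution_alt numbers
instance (numbers : List Int) (out : List Int) : Decidable (Spec_solution numbers out) := by unfold Spec_solution; infer_instance

-- ===== CLAIM (what is proved, stated in full; the proofs are below) =====
def Claim_equal_solution : Prop := ∀ (numbers : List Int), Dom_solution numbers → Pre_solution numbers → Spec_solution numbers (solution numbers)

-- ===== LEMMAS AND PROOFS =====

theorem pv_mod_two (n : Int) : PySem.Int.mod n 2 = n % 2 := by
  simp [PySem.Int.mod, Int.fmod_eq_emod]

theorem pv_fdiv_two (n : Int) : PySem.Int.floordiv n 2 = n / 2 := by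
  simp [PySem.Int.floordiv, Int.fdiv_eq_ediv]

-- A's loop count with the canonical fuel n.natAbs + 1.
def loopCnt (n : Int) : Nat := (solutionLoop (n.natAbs + 1) n 0).2

-- the counter is a plain accumulator
theorem solutionLoop_snd_acc (fuel : Nat) :
    ∀ (n : Int) (c : Nat), (solutionLoop fuel n c).2 = c + (solutionLoop fuel n 0).2 := by
  induction fuel with
  | zero => intro n c; simp [solutionLoop]
  | succ f ih =>
    intro n c
    by_cases h : n % 2 = 1
    · simp only [solutionLoop, pv_mod_two, pv_fdiv_two, if_pos h]
      rw [ih _ (c + 1), ih _ 1]; omega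
    · simp only [solutionLoop, pv_mod_two, if_neg h]; omega

-- any sufficient fuel computes loopCnt
theorem loopCnt_fuel : ∀ (k : Nat) (n : Int), n.natAbs = k → n ≠ -1 →
    ∀ f : Nat, n.natAbs < f → (solutionLoop f n 0).2 = loopCnt n := by
  intro k
  induction k using Nat.strong_induction_on with
  | _ k ih =>
    intro n hk hne f hf
    subst hk
    obtain ⟨g, rfl⟩ : ∃ g, f = g + 1 := ⟨f - 1, by omega⟩
    by_cases h : n % 2 = 1
    · have hlt : (n / 2).natAbs < n.natAbs := by omega
      have hne' : n / 2 ≠ -1 := by omega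
      have step : ∀ f' : Nat, (solutionLoop (f' + 1) n 0).2 = 1 + (solutionLoop f' (n / 2) 0).2 := by
        intro f'
        simp only [solutionLoop, pv_mod_two, pv_fdiv_two, if_pos h]
        rw [solutionLoop_snd_acc]
      have e1 := ih (n / 2).natAbs hlt (n / 2) rfl hne' g (by omega)
      have e2 := ih (n / 2).natAbs hlt (n / 2) rfl hne' n.natAbs (by omega)
      have e12 : (solutionLoop g (n / 2) 0).2 = (solutionLoop n.natAbs (n / 2) 0).2 :=
        e1.trans e2.symm
      rw [step g]
      unfold loopCnt
      rw [step n.natAbs, e12]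
    · simp only [loopCnt, solutionLoop, pv_mod_two, if_neg h]

theorem loopCnt_even (n : Int) (h : n % 2 = 0) : loopCnt n = 0 := by
  have h' : ¬ n % 2 = 1 := by omega
  simp only [loopCnt, solutionLoop, pv_mod_two, if_neg h']

theorem loopCnt_odd (n : Int) (hodd : n % 2 = 1) (hne : n ≠ -1) :
    loopCnt n = 1 + loopCnt (n / 2) := by
  have hne' : n / 2 ≠ -1 := by omega
  have hlt : (n / 2).natAbs < n.natAbs := by omega
  show (solutionLoop (n.natAbs + 1) n 0).2 = 1 + loopCnt (n / 2)
  simp only [solutionLoop, pv_mod_two, pv_fdiv_two, if_pos hodd]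
  rw [solutionLoop_snd_acc]
  rw [loopCnt_fuel (n / 2).natAbs (n / 2) rfl hne' n.natAbs (by omega)]

-- ---- bit arithmetic on Nat ----
def gNat (m : Nat) : Nat := m - (m &&& (m - 1))

theorem land_pred_of_odd (m : Nat) (h : m % 2 = 1) : m &&& (m - 1) = m - 1 := by
  apply Nat.eq_of_testBit_eq
  intro i
  rw [Nat.testBit_land]
  cases i with
  | zero =>
    simp only [Nat.testBit_zero]
    have h2 : (m - 1) % 2 = 0 := by omega
    simp [h, h2]
  | succ i =>
    rw [Nat.testBit_succ, Nat.testBit_succ]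
    have e : (m - 1) / 2 = m / 2 := by omega
    rw [e, Bool.and_self]

theorem land_double (k : Nat) (hk : 0 < k) :
    (2 * k) &&& (2 * k - 1) = 2 * (k &&& (k - 1)) := by
  apply Nat.eq_of_testBit_eq
  intro i
  rw [Nat.testBit_land]
  cases i with
  | zero =>
    simp only [Nat.testBit_zero]
    have h1 : (2 * k) % 2 = 0 := by omega
    have h2 : (2 * (k &&& (k - 1))) % 2 = 0 := by omega
    simp [h1, h2]
  | succ i =>
    rw [Nat.testBit_succ, Nat.testBit_succ, Nat.testBit_succ]
    have e1 : (2 * k) / 2 = k := by omega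
    have e2 : (2 * k - 1) / 2 = k - 1 := by omega
    have e3 : (2 * (k &&& (k - 1))) / 2 = k &&& (k - 1) := by omega
    rw [e1, e2, e3, Nat.testBit_land]

theorem gNat_odd (m : Nat) (h : m % 2 = 1) : gNat m = 1 := by
  unfold gNat
  rw [land_pred_of_odd m h]; omega

theorem gNat_double (k : Nat) (hk : 0 < k) : gNat (2 * k) = 2 * gNat k := by
  unfold gNat
  rw [land_double k hk]
  have := Nat.and_le_left (n := k) (m := k - 1)
  omega

-- PySem.Int.band x (-x) computed through natAbs
theorem band_neg_self (x : Int) (hx : x ≠ 0) :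
    PySem.Int.band x (-x) = ((x.natAbs - (x.natAbs &&& (x.natAbs - 1)) : Nat) : Int) := by
  rcases lt_trichotomy x 0 with hlt | hz | hgt
  · have h1 : ¬ (0 : Int) ≤ x := by omega
    have h2 : (0 : Int) ≤ -x := by omega
    simp only [PySem.Int.band, if_neg h1, if_pos h2]
    have e1 : (-x).toNat = x.natAbs := by omega
    have e2 : (-x - 1).toNat = x.natAbs - 1 := by omega
    rw [e1, e2]
  · exact absurd hz hx
  · have h1 : (0 : Int) ≤ x := by omega
    have h2 : ¬ (0 : Int) ≤ -x := by omega
    simp only [PySem.Int.band, if_pos h1, if_neg h2]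
    have e1 : x.toNat = x.natAbs := by omega
    have e2 : (- -x - 1).toNat = x.natAbs - 1 := by omega
    rw [e1, e2]

-- the heart: for odd n ≠ -1, the lowest set bit of n+1 is 2^(loopCnt n)
theorem gNat_eq_pow : ∀ (k : Nat) (n : Int), n.natAbs = k → n % 2 = 1 → n ≠ -1 →
    gNat ((n + 1).natAbs) = 2 ^ loopCnt n := by
  intro k
  induction k using Nat.strong_induction_on with
  | _ k ih =>
    intro n hk hodd hne
    subst hk
    have hne' : n / 2 ≠ -1 := by omega
    have habs : (n + 1).natAbs = 2 * (n / 2 + 1).natAbs := by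
      have e : n + 1 = 2 * (n / 2 + 1) := by omega
      rw [e, Int.natAbs_mul]; norm_num
    rw [loopCnt_odd n hodd hne, habs]
    by_cases hq : (n / 2) % 2 = 1
    · -- recursive case
      have hlt : (n / 2).natAbs < n.natAbs := by omega
      have ihq := ih (n / 2).natAbs hlt (n / 2) rfl hq hne'
      have hpos : 0 < (n / 2 + 1).natAbs := by omega
      rw [gNat_double _ hpos, ihq, add_comm, pow_succ]
      ring
    · -- base case: n/2 even, n/2+1 odd, loopCnt (n/2) = 0
      have hq0 : (n / 2) % 2 = 0 := by omega
      rw [loopCnt_even _ hq0]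
      have hoddq : (n / 2 + 1).natAbs % 2 = 1 := by omega
      have hpos : 0 < (n / 2 + 1).natAbs := by omega
      rw [gNat_double _ hpos, gNat_odd _ hoddq]
      norm_num

theorem pv_cast_shiftRight (m k : Nat) : ((m : Int) >>> k) = ((m >>> k : Nat) : Int) := rfl

-- per-element agreement
theorem elem_eq (n : Int) (hne : n ≠ -1) :
    (if loopCnt n ≠ 0 then n + 2 ^ (loopCnt n - 1) else n + 1)
      = (if PySem.Int.mod n 2 = 0 then n + 1
         else n + (PySem.Int.band (n + 1) (-(n + 1)) >>> (1 : Nat))) := by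
  rw [pv_mod_two]
  by_cases h : n % 2 = 0
  · rw [if_pos h, loopCnt_even n h]; simp
  · have hodd : n % 2 = 1 := by omega
    rw [if_neg h]
    have hc : loopCnt n = 1 + loopCnt (n / 2) := loopCnt_odd n hodd hne
    have hcne : loopCnt n ≠ 0 := by omega
    rw [if_pos hcne]
    have hx : n + 1 ≠ 0 := by omega
    rw [band_neg_self (n + 1) hx]
    have hg : (n + 1).natAbs - ((n + 1).natAbs &&& ((n + 1).natAbs - 1)) = 2 ^ loopCnt n := by
      have hh := gNat_eq_pow n.natAbs n rfl hodd hne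
      unfold gNat at hh
      exact hh
    rw [hg]
    have hnshift : (2 ^ loopCnt n : Nat) >>> 1 = 2 ^ (loopCnt n - 1) := by
      rw [Nat.shiftRight_succ, Nat.shiftRight_zero]
      obtain ⟨c, hcc⟩ : ∃ c, loopCnt n = c + 1 := ⟨loopCnt n - 1, by omega⟩
      rw [hcc, pow_succ, Nat.add_sub_cancel]; omega
    rw [pv_cast_shiftRight, hnshift]
    push_cast
    ring

-- A's foldl-append is a map
theorem foldl_append_map (f : Int → Int) :
    ∀ (l : List Int) (acc : List Int),
      l.foldl (fun a n => a ++ [f n]) acc = acc ++ l.map f := by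
  intro l
  induction l with
  | nil => intro acc; simp
  | cons x xs ih => intro acc; simp [ih]

-- ===== VERDICT (by name: the statement is the Claim_ definition above) =====
theorem solution_spec : Claim_equal_solution := by
  intro numbers _ hpre
  unfold Spec_solution solution solution_alt
  rw [foldl_append_map (fun n =>
        if (solutionLoop (n.natAbs + 1) n 0).2 ≠ 0
        then n + 2 ^ ((solutionLoop (n.natAbs + 1) n 0).2 - 1) else n + 1) numbers []]
  simp only [List.nil_append]
  apply List.map_congr_left
  intro n hn
  have hne : n ≠ -1 := fun h => hpre (h ▸ hn)
  exact elem_eq n hne
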